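-- pv_equiv track=rewrite | github.com/pypi-data/pypi-mirror-245 | packages/cryptoolzf/cryptoolzf-2.0.0-py2.py3-none-any.whl/cryptoolzf/utils.py | process_naked_b64
-- ===== SOURCE A (Python) =====
-- from typing import List, Dict, Union, Optional, Any
--
-- def process_naked_b64(
--     b64_lines_block: List[str], context_chunks: List[Union[str, List[str]]]
-- ) -> List[str]:
--     results = []
--
--     for block in b64_lines_block:
--         lines = block.split("=")
--         for i in range(len(lines) - 1):
--             results.append(lines[i].strip() + "=")
--
--     return results
-- ===== SOURCE B (Python) =====
-- def process_naked_b64(b64_lines_block, context_chunks):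
--     # Single character scan per block: emit each '='-terminated run directly,
--     # instead of building a full split list and indexing into it.
--     results = []
--     for block in b64_lines_block:
--         seg = []
--         for ch in block:
--             if ch == "=":
--                 results.append("".join(seg).strip() + "=")
--                 seg = []
--             else:
--                 seg.append(ch)
--     return results
-- ===== Notes on version B (the rewrite author's own statement) =====
-- stated objective: alternative
-- what changed: A builds the full split('=') list per block and loops over indices 0..len-2; B makes a single character scan per block with a segment accumulator, emitting each '='-terminated run as it is found.
import Mathlib
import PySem

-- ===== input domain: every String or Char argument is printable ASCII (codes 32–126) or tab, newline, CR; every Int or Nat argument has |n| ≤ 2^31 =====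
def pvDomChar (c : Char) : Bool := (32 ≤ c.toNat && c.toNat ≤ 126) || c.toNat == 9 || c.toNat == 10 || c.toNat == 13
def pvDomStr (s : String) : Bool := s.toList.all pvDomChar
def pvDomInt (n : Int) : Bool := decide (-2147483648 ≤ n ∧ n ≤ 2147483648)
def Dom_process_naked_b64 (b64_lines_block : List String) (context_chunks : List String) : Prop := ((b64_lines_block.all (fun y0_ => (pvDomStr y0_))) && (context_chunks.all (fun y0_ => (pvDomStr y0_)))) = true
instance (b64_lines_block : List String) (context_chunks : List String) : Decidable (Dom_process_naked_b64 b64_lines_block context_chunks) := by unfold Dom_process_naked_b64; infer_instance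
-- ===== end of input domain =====

-- B replaces A's split-then-index loop with a single character scan per block
-- that emits each '='-terminated run directly (objective: alternative, same cost).

-- ===== PORT A =====
-- A: for each block, lines = block.split("="); for i in range(len(lines)-1): results.append(lines[i].strip() + "=")
def process_naked_b64 (b64_lines_block : List String) (context_chunks : List String) : List String :=
  let _ := context_chunks  -- unused by A
  b64_lines_block.foldl (fun results block =>
    let lines := (PySem.Str.split? block "=").getD []   -- sep "=" is nonempty, so split? is `some`
    (PySem.List.pyRange 0 ((lines.length : Int) - 1) 1).foldl
      (fun results i => results ++ [PySem.Str.strip (PySem.List.pyGetD lines i "") ++ "="]) results) []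

-- ===== PORT B =====
-- B's inner character loop: seg accumulates non-'=' chars; on '=' emit "".join(seg).strip() + "=".
-- Python's `seg` is a list of 1-char strings; it is ported as List Char, and `"".join(seg)` as String.ofList.
def pvAltInner : List Char → List Char → List String → List String
  | [], _seg, results => results
  | c :: rest, seg, results =>
    if c = '=' then pvAltInner rest [] (results ++ [PySem.Str.strip (String.ofList seg) ++ "="])
    else pvAltInner rest (seg ++ [c]) results

def process_naked_b64_alt (b64_lines_block : List String) (context_chunks : List String) : List String :=
  let _ := context_chunks  -- unused by B
  b64_lines_block.foldl (fun results block => pvAltInner block.toList [] results) []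

-- ===== PRECONDITION & SPEC =====
def Spec_process_naked_b64 (b64_lines_block : List String) (context_chunks : List String) (out : List String) : Prop := out = process_naked_b64_alt b64_lines_block context_chunks
instance (b64_lines_block : List String) (context_chunks : List String) (out : List String) : Decidable (Spec_process_naked_b64 b64_lines_block context_chunks out) := by unfold Spec_process_naked_b64; infer_instance

-- ===== CLAIM (what is proved, stated in full; the proofs are below) =====
def Claim_equal_process_naked_b64 : Prop := ∀ (b64_lines_block : List String) (context_chunks : List String), Dom_process_naked_b64 b64_lines_block context_chunks → Spec_process_naked_b64 b64_lines_block context_chunks (process_naked_b64 b64_lines_block context_chunks)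

-- ===== LEMMAS AND PROOFS =====

-- the '='-separated pieces of l when the piece under construction so far is cur (in order)
def pvPieces : List Char → List Char → List (List Char)
  | [], cur => [cur]
  | c :: rest, cur => if c = '=' then cur :: pvPieces rest [] else pvPieces rest (cur ++ [c])

theorem pvPieces_ne_nil (l cur : List Char) : pvPieces l cur ≠ [] := by
  induction l generalizing cur with
  | nil => simp [pvPieces]
  | cons c rest ih => by_cases h : c = '=' <;> simp [pvPieces, h, ih]

theorem pv_go_eq : ∀ (l : List Char) (fuel : Nat) (cur : List Char) (acc : List (List Char)),
    l.length ≤ fuel →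
    PySem.Chars.splitOn.go ['='] fuel l cur acc = acc.reverse ++ pvPieces l cur.reverse := by
  intro l
  induction l with
  | nil =>
    intro fuel cur acc _
    cases fuel <;> simp [PySem.Chars.splitOn.go, pvPieces]
  | cons c rest ih =>
    intro fuel cur acc hle
    cases fuel with
    | zero => simp at hle
    | succ f =>
      by_cases h : c = '='
      · subst h
        have : PySem.Chars.splitOn.go ['='] (f+1) ('=' :: rest) cur acc
            = PySem.Chars.splitOn.go ['='] f rest [] (cur.reverse :: acc) := by
          simp [PySem.Chars.splitOn.go, List.isPrefixOf]
        rw [this, ih f [] (cur.reverse :: acc) (by simpa using Nat.lt_succ_iff.mp (by simpa using hle))]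
        simp [pvPieces]
      · have : PySem.Chars.splitOn.go ['='] (f+1) (c :: rest) cur acc
            = PySem.Chars.splitOn.go ['='] f rest (c :: cur) acc := by
          simp [PySem.Chars.splitOn.go, List.isPrefixOf, Ne.symm h]
        rw [this, ih f (c :: cur) acc (by simpa using Nat.lt_succ_iff.mp (by simpa using hle))]
        simp [pvPieces, h]

theorem pv_splitOn_eq (l : List Char) : PySem.Chars.splitOn l ['='] = pvPieces l [] := by
  unfold PySem.Chars.splitOn
  rw [pv_go_eq l (l.length + 1) [] [] (by omega)]
  simp

-- B's inner loop computes the mapped dropLast of the pieces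
theorem pvAltInner_eq (l : List Char) : ∀ (seg : List Char) (res : List String),
    pvAltInner l seg res
      = res ++ (pvPieces l seg).dropLast.map (fun cs => PySem.Str.strip (String.ofList cs) ++ "=") := by
  induction l with
  | nil => intro seg res; simp [pvAltInner, pvPieces]
  | cons c rest ih =>
    intro seg res
    by_cases h : c = '='
    · subst h
      rw [show pvAltInner ('=' :: rest) seg res
            = pvAltInner rest [] (res ++ [PySem.Str.strip (String.ofList seg) ++ "="]) from by simp [pvAltInner]]
      rw [ih]
      have hne := pvPieces_ne_nil rest []
      simp [pvPieces, List.dropLast_cons_of_ne_nil hne]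
    · rw [show pvAltInner (c :: rest) seg res = pvAltInner rest (seg ++ [c]) res from by simp [pvAltInner, h]]
      rw [ih]
      simp [pvPieces, h]

-- A's index loop over range(len(lines)-1) is a map over lines.dropLast
theorem pv_fold_range_dropLast (xs : List String) (f : String → String) (res : List String) :
    (PySem.List.pyRange 0 ((xs.length : Int) - 1) 1).foldl
        (fun res i => res ++ [f (PySem.List.pyGetD xs i "")]) res
      = res ++ xs.dropLast.map f := by
  cases xs with
  | nil => simp [PySem.List.pyRange]
  | cons x xt =>
    have hlen : ((x :: xt).length : Int) - 1 = ((x :: xt).dropLast.length : Int) := by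
      simp [List.length_dropLast]
    rw [hlen]
    rw [PySem.List.foldl_congr_mem _ _
      (fun res i => res ++ [f (PySem.List.pyGetD (x :: xt).dropLast i "")]) res ?_]
    · rw [PySem.List.foldl_pyRange_zero_pyGetD' ((x :: xt).dropLast) "" (fun res s => res ++ [f s]) res]
      rw [PySem.List.foldl_append_singleton_eq_map]
    · intro acc i hi
      rw [PySem.List.mem_pyRange_one] at hi
      obtain ⟨h0, h1⟩ := hi
      have hlt : i.toNat < (x :: xt).dropLast.length := by omega
      have hll : (x :: xt).dropLast.length ≤ (x :: xt).length := by
        simp [List.length_dropLast]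
      have h1' : i < ((x :: xt).length : Int) := by
        have : ((x :: xt).dropLast.length : Int) ≤ ((x :: xt).length : Int) := by exact_mod_cast hll
        omega
      simp only []
      rw [PySem.List.pyGetD_eq_getElem _ _ h0 h1', PySem.List.pyGetD_eq_getElem _ _ h0 h1]
      rw [List.getElem_dropLast]

-- per-block: A's step equals B's step
theorem pv_step_eq (res : List String) (block : String) :
    (let lines := (PySem.Str.split? block "=").getD []
     (PySem.List.pyRange 0 ((lines.length : Int) - 1) 1).foldl
       (fun res i => res ++ [PySem.Str.strip (PySem.List.pyGetD lines i "") ++ "="]) res)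
    = pvAltInner block.toList [] res := by
  have hsplit : (PySem.Str.split? block "=").getD [] = (pvPieces block.toList []).map String.ofList := by
    simp [PySem.Str.split?, PySem.Chars.split?, pv_splitOn_eq]
  simp only [hsplit]
  rw [pv_fold_range_dropLast ((pvPieces block.toList []).map String.ofList)
        (fun s => PySem.Str.strip s ++ "=") res]
  rw [pvAltInner_eq]
  rw [← List.map_dropLast]
  simp [List.map_map, Function.comp_def]

-- ===== VERDICT (by name: the statement is the Claim_ definition above) =====
theorem process_naked_b64_spec : Claim_equal_process_naked_b64 := by
  intro blocks ctx _
  unfold Spec_process_naked_b64 process_naked_b64 process_naked_b64_alt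
  exact PySem.List.foldl_congr_mem blocks _ _ [] (fun acc b _ => pv_step_eq acc b)
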